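-- pv_equiv track=rewrite | github.com/juliaburun/tp6 | tp6/11.py | dig_central
-- ===== SOURCE A (Python) =====
-- def dig_central(numero):
--
--     num = numero
--     digitos = 0
--
--     while num > 0:
--         digitos += 1
--         num = num // 10
--
--     if digitos % 2 == 0:
--         return -1
--     else:
--         num = numero
--
--         divisor = 10 ** ((digitos - 1) // 2)
--
--         num //= divisor
--
--         return num % 10
-- ===== SOURCE B (Python) =====
-- def dig_central(numero):
--     slow = numero
--     fast = numero
--     while fast > 9:
--         fast //= 100
--         slow //= 10
--     return slow % 10 if fast > 0 else -1
-- ===== Notes on version B (the rewrite author's own statement) =====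
-- stated objective: alternative
-- what changed: B uses a single-pass two-pointer (tortoise/hare) scheme: a fast cursor drops two digits per step while a slow cursor drops one, so when the fast cursor is exhausted the slow cursor sits on the central digit and no digit count or power-of-ten divisor is ever computed.
import Mathlib
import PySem

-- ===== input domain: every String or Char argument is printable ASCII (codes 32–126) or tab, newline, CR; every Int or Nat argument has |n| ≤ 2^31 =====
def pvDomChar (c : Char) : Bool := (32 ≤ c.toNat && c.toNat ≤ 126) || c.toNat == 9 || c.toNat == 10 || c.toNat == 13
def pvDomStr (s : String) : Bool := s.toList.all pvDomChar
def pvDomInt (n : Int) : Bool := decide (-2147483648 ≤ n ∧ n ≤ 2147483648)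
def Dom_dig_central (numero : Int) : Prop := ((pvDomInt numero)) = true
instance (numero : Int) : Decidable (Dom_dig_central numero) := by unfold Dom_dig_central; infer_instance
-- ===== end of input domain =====

-- B replaces A's count-then-recompute scheme by a single-pass two-pointer walk (fast cursor
-- drops two digits per step, slow cursor one), never computing a digit count or divisor.

-- ===== PORT A =====
-- A's counting while-loop: digitos
def digCountA (num : Int) : Int :=
  if _h : num > 0 then digCountA (PySem.Int.floordiv num 10) + 1 else 0
termination_by num.toNat
decreasing_by
  rw [PySem.Int.floordiv_eq_ediv_of_pos (by omega)]
  omega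

def dig_central (numero : Int) : Int :=
  if PySem.Int.mod (digCountA numero) 2 = 0 then -1
  else
    PySem.Int.mod
      (PySem.Int.floordiv numero
        (10 ^ (PySem.Int.floordiv (digCountA numero - 1) 2).toNat)) 10

-- ===== PORT B =====
-- B's while-loop plus its final conditional return, as one tail recursion on (slow, fast)
def raceB (slow fast : Int) : Int :=
  if _h : fast > 9 then raceB (PySem.Int.floordiv slow 10) (PySem.Int.floordiv fast 100)
  else if fast > 0 then PySem.Int.mod slow 10 else -1
termination_by fast.toNat
decreasing_by
  rw [PySem.Int.floordiv_eq_ediv_of_pos (by omega)]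
  omega

def dig_central_alt (numero : Int) : Int := raceB numero numero

-- ===== PRECONDITION & SPEC =====
def Spec_dig_central (numero : Int) (out : Int) : Prop := out = dig_central_alt numero
instance (numero : Int) (out : Int) : Decidable (Spec_dig_central numero out) := by unfold Spec_dig_central; infer_instance

-- ===== CLAIM (what is proved, stated in full; the proofs are below) =====
def Claim_equal_dig_central : Prop := ∀ (numero : Int), Dom_dig_central numero → Spec_dig_central numero (dig_central numero)

-- ===== LEMMAS AND PROOFS =====

theorem digCountA_nonneg (n : Int) : 0 ≤ digCountA n := by
  fun_induction digCountA n with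
  | case1 n h ih => omega
  | case2 n h => simp

theorem digCountA_pos (n : Int) (h : 0 < n) : 1 ≤ digCountA n := by
  rw [digCountA, dif_pos h]
  have := digCountA_nonneg (PySem.Int.floordiv n 10)
  omega

theorem digCountA_floordiv (n : Int) (h : 0 < n) :
    digCountA (PySem.Int.floordiv n 10) = digCountA n - 1 := by
  conv_rhs => rw [digCountA, dif_pos h]
  omega

-- raceB in terms of A's digit count
theorem raceB_eq (slow fast : Int) :
    raceB slow fast =
      if PySem.Int.mod (digCountA fast) 2 = 0 then -1
      else
        PySem.Int.mod
          (PySem.Int.floordiv slow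
            (10 ^ (PySem.Int.floordiv (digCountA fast - 1) 2).toNat)) 10 := by
  fun_induction raceB slow fast with
  | case1 slow fast h ih =>
    have h10 : 0 < fast ∧ 0 < PySem.Int.floordiv fast 10 := by
      rw [PySem.Int.floordiv_eq_ediv_of_pos (by norm_num)]
      omega
    have hd2 : digCountA (PySem.Int.floordiv fast 100) = digCountA fast - 2 := by
      have hcomp : PySem.Int.floordiv fast 100
          = PySem.Int.floordiv (PySem.Int.floordiv fast 10) 10 := by
        rw [PySem.Int.floordiv_eq_ediv_of_pos (by norm_num : (0:Int) < 10),
            PySem.Int.floordiv_eq_ediv_of_pos (by norm_num : (0:Int) < 10),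
            PySem.Int.floordiv_eq_ediv_of_pos (by norm_num : (0:Int) < 100),
            Int.ediv_ediv_of_nonneg (by norm_num : (0:Int) ≤ 10)]
        norm_num
      rw [hcomp, digCountA_floordiv _ h10.2, digCountA_floordiv _ h10.1]
      omega
    have hge2 : 2 ≤ digCountA fast := by
      conv_rhs => rw [digCountA, dif_pos h10.1]
      have := digCountA_pos _ h10.2
      omega
    rw [ih, hd2]
    have hm : PySem.Int.mod (digCountA fast - 2) 2 = PySem.Int.mod (digCountA fast) 2 := by
      rw [PySem.Int.mod_eq_emod_of_pos (by norm_num), PySem.Int.mod_eq_emod_of_pos (by norm_num)]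
      omega
    rw [hm]
    by_cases he : PySem.Int.mod (digCountA fast) 2 = 0
    · rw [if_pos he, if_pos he]
    · rw [if_neg he, if_neg he]
      have hodd : digCountA fast % 2 ≠ 0 := by
        rw [PySem.Int.mod_eq_emod_of_pos (by norm_num)] at he
        exact he
      have hexp : (PySem.Int.floordiv (digCountA fast - 1) 2).toNat
          = (PySem.Int.floordiv (digCountA fast - 2 - 1) 2).toNat + 1 := by
        rw [PySem.Int.floordiv_eq_ediv_of_pos (by norm_num : (0:Int) < 2),
            PySem.Int.floordiv_eq_ediv_of_pos (by norm_num : (0:Int) < 2)]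
        omega
      rw [hexp, pow_succ]
      congr 1
      rw [PySem.Int.floordiv_eq_ediv_of_pos (by norm_num : (0:Int) < 10),
          PySem.Int.floordiv_eq_ediv_of_pos (by positivity),
          PySem.Int.floordiv_eq_ediv_of_pos (by positivity),
          Int.ediv_ediv_of_nonneg (by norm_num : (0:Int) ≤ 10)]
      ring_nf
      rw [PySem.Int.floordiv_eq_ediv_of_pos (by positivity)]
  | case2 slow fast h hp =>
    -- 1 ≤ fast ≤ 9: digit count is exactly 1
    have hd : digCountA fast = 1 := by
      rw [digCountA, dif_pos hp]
      have h0 : ¬ (PySem.Int.floordiv fast 10 > 0) := by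
        rw [PySem.Int.floordiv_eq_ediv_of_pos (by norm_num)]
        omega
      rw [digCountA, dif_neg h0]
      omega
    rw [hd, if_neg (by decide)]
    have hexp : (PySem.Int.floordiv ((1:Int) - 1) 2).toNat = 0 := by decide
    rw [hexp, pow_zero, PySem.Int.floordiv_eq_ediv_of_pos (by norm_num), Int.ediv_one]
  | case3 slow fast h hp =>
    have hd : digCountA fast = 0 := by rw [digCountA, dif_neg hp]
    rw [hd, if_pos (by decide)]
-- ===== VERDICT (by name: the statement is the Claim_ definition above) =====
theorem dig_central_spec : Claim_equal_dig_central := by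
  intro numero _
  unfold Spec_dig_central dig_central dig_central_alt
  rw [raceB_eq]
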